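-- pv_equiv track=rewrite | github.com/Hamid-K/PowerBI | PowerBI/Microsoft.MashupEngine.Library45/Microsoft.MashupEngine.Library45/Microsoft/ProgramSynthesis/Split/Text/Translation/Python/split_python_semantics.py | in_quoted_region
-- ===== SOURCE A (Python) =====
-- def in_quoted_region(quotedRegions, position, lowIndex = -1, highIndex = -1):
--     if (lowIndex == -1):
--         return in_quoted_region(quotedRegions, position, 0, len(quotedRegions) - 1)
--     if (len(quotedRegions) == 0 or highIndex < lowIndex):
--         return False
--     difference = highIndex - lowIndex
--     if (difference <= 1):
--         if (quotedRegions[lowIndex][0] <= position and quotedRegions[lowIndex][1] >= position):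
--             return True
--         if (highIndex > lowIndex and quotedRegions[highIndex][0] <= position and quotedRegions[highIndex][1] >= position):
--             return True
--         return False
--     mid_index = lowIndex + (difference // 2)
--     if (quotedRegions[mid_index][0] > position):
--         return in_quoted_region(quotedRegions, position, lowIndex, mid_index - 1)
--     return in_quoted_region(quotedRegions, position, mid_index, highIndex)
-- ===== SOURCE B (Python) =====
-- def in_quoted_region(quotedRegions, position, lowIndex = -1, highIndex = -1):
--     if lowIndex == -1:
--         lowIndex, highIndex = 0, len(quotedRegions) - 1
--     n = len(quotedRegions)
--     while n > 0 and lowIndex <= highIndex: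
--         diff = highIndex - lowIndex
--         if diff <= 1:
--             s, e = quotedRegions[lowIndex]
--             if s <= position <= e:
--                 return True
--             if diff == 1:
--                 s, e = quotedRegions[highIndex]
--                 return s <= position <= e
--             return False
--         mid = lowIndex + diff // 2
--         if quotedRegions[mid][0] > position:
--             highIndex = mid - 1
--         else:
--             lowIndex = mid
--     return False
-- ===== Notes on version B (the rewrite author's own statement) =====
-- stated objective: alternative
-- what changed: A's tail recursion (with the -1 sentinel re-checked on every call) is rewritten as a single sentinel normalization followed by an explicit iterative while-loop over the index bounds, with the base case expressed via diff==1 and chained comparisons instead of A's if-chain.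
-- outside the precondition, e.g. on in_quoted_region([(0, 5), (10, 20), (30, 40)], 35, -3, 1): A returns True, B returns False; on in_quoted_region([(0, 5), (6, 7), (8, 9)], 4, 1, 3): A returns False, B returns False
import Mathlib
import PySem

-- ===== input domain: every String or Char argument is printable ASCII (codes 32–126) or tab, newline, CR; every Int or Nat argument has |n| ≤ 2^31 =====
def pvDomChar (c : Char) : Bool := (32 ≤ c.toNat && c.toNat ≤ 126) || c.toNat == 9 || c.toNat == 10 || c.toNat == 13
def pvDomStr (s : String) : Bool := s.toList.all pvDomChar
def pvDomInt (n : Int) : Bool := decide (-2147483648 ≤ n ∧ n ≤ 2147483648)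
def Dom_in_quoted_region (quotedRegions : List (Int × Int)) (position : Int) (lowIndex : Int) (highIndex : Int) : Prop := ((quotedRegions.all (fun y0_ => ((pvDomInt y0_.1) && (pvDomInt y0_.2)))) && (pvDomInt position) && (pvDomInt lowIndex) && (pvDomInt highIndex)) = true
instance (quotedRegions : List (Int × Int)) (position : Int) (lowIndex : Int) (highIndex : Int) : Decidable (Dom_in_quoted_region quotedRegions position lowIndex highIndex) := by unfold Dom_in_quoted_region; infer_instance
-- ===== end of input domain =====

-- B replaces A's tail recursion (sentinel re-checked every call) by one sentinel normalization plus an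
-- explicit iterative loop over the index bounds (objective: alternative decomposition, same cost).

-- ===== PORT A =====
-- Literal port of A's tail recursion; the -1 sentinel branch restarts with (0, len-1) exactly as A does.
def in_quoted_region (quotedRegions : List (Int × Int)) (position : Int) (lowIndex : Int) (highIndex : Int) : Bool :=
  if lowIndex = -1 then
    in_quoted_region quotedRegions position 0 ((quotedRegions.length : Int) - 1)
  else if quotedRegions.length = 0 ∨ highIndex < lowIndex then
    false
  else if highIndex - lowIndex ≤ 1 then
    -- difference = highIndex - lowIndex and mid_index = lowIndex + difference // 2 are inlined
    if (PySem.List.pyGetD quotedRegions lowIndex (0, 0)).1 ≤ position ∧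
       (PySem.List.pyGetD quotedRegions lowIndex (0, 0)).2 ≥ position then true
    else if highIndex > lowIndex ∧
            (PySem.List.pyGetD quotedRegions highIndex (0, 0)).1 ≤ position ∧
            (PySem.List.pyGetD quotedRegions highIndex (0, 0)).2 ≥ position then true
    else false
  else if (PySem.List.pyGetD quotedRegions (lowIndex + PySem.Int.floordiv (highIndex - lowIndex) 2) (0, 0)).1 > position then
    in_quoted_region quotedRegions position lowIndex (lowIndex + PySem.Int.floordiv (highIndex - lowIndex) 2 - 1)
  else
    in_quoted_region quotedRegions position (lowIndex + PySem.Int.floordiv (highIndex - lowIndex) 2) highIndex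
termination_by ((if lowIndex < -1 then 2 else if lowIndex = -1 then 1 else 0 : Nat), (highIndex - lowIndex).toNat)
decreasing_by
  · apply Prod.Lex.left
    norm_num
    split_ifs <;> omega
  · rw [PySem.Int.floordiv_eq_ediv_of_pos (show (0:Int) < 2 by norm_num)]
    apply Prod.Lex.right
    omega
  · simp only [PySem.Int.floordiv_eq_ediv_of_pos (show (0:Int) < 2 by norm_num)] at *
    split_ifs <;>
      first
        | (apply Prod.Lex.left; omega)
        | (apply Prod.Lex.right; omega)

-- ===== PORT B =====
-- B's while-loop: runs while n > 0 and lowIndex <= highIndex, shrinking the bounds.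
def pvAltLoop (n : Int) (quotedRegions : List (Int × Int)) (position : Int) (lowIndex : Int) (highIndex : Int) : Bool :=
  if n > 0 ∧ lowIndex ≤ highIndex then
    if highIndex - lowIndex ≤ 1 then
      -- diff = highIndex - lowIndex and mid = lowIndex + diff // 2 are inlined
      if (PySem.List.pyGetD quotedRegions lowIndex (0, 0)).1 ≤ position ∧
         position ≤ (PySem.List.pyGetD quotedRegions lowIndex (0, 0)).2 then true
      else if highIndex - lowIndex = 1 then
        decide ((PySem.List.pyGetD quotedRegions highIndex (0, 0)).1 ≤ position ∧
                position ≤ (PySem.List.pyGetD quotedRegions highIndex (0, 0)).2)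
      else false
    else if (PySem.List.pyGetD quotedRegions (lowIndex + PySem.Int.floordiv (highIndex - lowIndex) 2) (0, 0)).1 > position then
      pvAltLoop n quotedRegions position lowIndex (lowIndex + PySem.Int.floordiv (highIndex - lowIndex) 2 - 1)
    else
      pvAltLoop n quotedRegions position (lowIndex + PySem.Int.floordiv (highIndex - lowIndex) 2) highIndex
  else false
termination_by (highIndex - lowIndex).toNat
decreasing_by
  all_goals
    simp only [PySem.Int.floordiv_eq_ediv_of_pos (show (0:Int) < 2 by norm_num)] at *
    omega

def in_quoted_region_alt (quotedRegions : List (Int × Int)) (position : Int) (lowIndex : Int) (highIndex : Int) : Bool :=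
  if lowIndex = -1 then
    pvAltLoop (quotedRegions.length : Int) quotedRegions position 0 ((quotedRegions.length : Int) - 1)
  else
    pvAltLoop (quotedRegions.length : Int) quotedRegions position lowIndex highIndex

-- ===== PRECONDITION & SPEC =====
-- Pre_ excludes explicit out-of-range bounds, on which A usually raises IndexError but may happen to
-- return when the search path avoids the bad index, and explicit negative lowIndex below the -1
-- sentinel (with highIndex ≥ lowIndex and a nonempty list), where Python's negative-index wraparound
-- can re-trigger A's sentinel restart mid-search — accidental artefacts of the sentinel encoding that
-- neither implementation should specify.
def Pre_in_quoted_region (quotedRegions : List (Int × Int)) (position : Int) (lowIndex : Int) (highIndex : Int) : Prop :=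
  quotedRegions = [] ∨ lowIndex = -1 ∨ highIndex < lowIndex ∨
    (0 ≤ lowIndex ∧ highIndex < (quotedRegions.length : Int))
instance (quotedRegions : List (Int × Int)) (position : Int) (lowIndex : Int) (highIndex : Int) : Decidable (Pre_in_quoted_region quotedRegions position lowIndex highIndex) := by unfold Pre_in_quoted_region; infer_instance

def pvWitness_in_quoted_region : (List (Int × Int)) × Int × Int × Int := ([(0, 5), (10, 12)], 11, -1, -1)

def Spec_in_quoted_region (quotedRegions : List (Int × Int)) (position : Int) (lowIndex : Int) (highIndex : Int) (out : Bool) : Prop := out = in_quoted_region_alt quotedRegions position lowIndex highIndex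
instance (quotedRegions : List (Int × Int)) (position : Int) (lowIndex : Int) (highIndex : Int) (out : Bool) : Decidable (Spec_in_quoted_region quotedRegions position lowIndex highIndex out) := by unfold Spec_in_quoted_region; infer_instance

-- ===== CLAIM (what is proved, stated in full; the proofs are below) =====
def Claim_equal_in_quoted_region : Prop := ∀ (quotedRegions : List (Int × Int)) (position : Int) (lowIndex : Int) (highIndex : Int), Dom_in_quoted_region quotedRegions position lowIndex highIndex → Pre_in_quoted_region quotedRegions position lowIndex highIndex → Spec_in_quoted_region quotedRegions position lowIndex highIndex (in_quoted_region quotedRegions position lowIndex highIndex)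

-- ===== LEMMAS AND PROOFS =====

-- On in-range bounds (0 ≤ low), A's recursion computes exactly what B's loop computes.
theorem pv_main (quotedRegions : List (Int × Int)) (position : Int) :
    ∀ (k : Nat) (low high : Int), (high - low).toNat ≤ k → 0 ≤ low →
      in_quoted_region quotedRegions position low high =
        pvAltLoop (quotedRegions.length : Int) quotedRegions position low high := by
  intro k
  induction k using Nat.strong_induction_on with
  | _ k ih =>
    intro low high hk hlow
    have hne : ¬ (low = -1) := by omega
    rw [in_quoted_region, pvAltLoop, if_neg hne]
    simp only [PySem.Int.floordiv_eq_ediv_of_pos (show (0:Int) < 2 by norm_num)]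
    split_ifs <;>
      first
        | rfl
        | (exact ih _ (by omega) _ _ le_rfl (by omega))
        | (symm; simp only [decide_eq_true_eq, decide_eq_false_iff_not]; omega)
        | omega

-- ===== VERDICT (by name: the statement is the Claim_ definition above) =====
theorem in_quoted_region_spec : Claim_equal_in_quoted_region := by
  intro quotedRegions position lowIndex highIndex _ hpre
  unfold Spec_in_quoted_region in_quoted_region_alt
  by_cases hlo : lowIndex = -1
  · rw [if_pos hlo, in_quoted_region, if_pos hlo]
    exact pv_main quotedRegions position _ 0 ((quotedRegions.length : Int) - 1) le_rfl le_rfl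
  · rw [if_neg hlo]
    rcases hpre with h | h | h | h
    · subst h
      rw [in_quoted_region, pvAltLoop, if_neg hlo]
      simp
    · exact absurd h hlo
    · rw [in_quoted_region, pvAltLoop, if_neg hlo, if_pos (Or.inr h), if_neg (by omega)]
    · exact pv_main quotedRegions position _ lowIndex highIndex le_rfl h.1
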